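-- pv_equiv track=rewrite | github.com/griffin-nemoto/Data-Structures-and-O.O.D.-HW | HW1/weather_analysis.py | find_lowest_temperature
-- ===== SOURCE A (Python) =====
-- def find_lowest_temperature(weather_data):
--     '''returns lowest temperature and date from list of weather data
--     Parameters: list containing weather data
--     Returns: tuple containing date and temperature of day with lowest temp'''
--     lo = weather_data[0][1]
--     index=0
--     for i in range(len(weather_data)):
--         if weather_data[i][1]<lo:
--             lo = weather_data[i][1]
--             index=i
--     return weather_data[index][0],lo
-- ===== SOURCE B (Python) =====
-- def find_lowest_temperature(weather_data):
--     '''returns lowest temperature and date from list of weather data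
--     Sort-based: stable sort ascending by temperature, take the first row
--     (stability keeps the earliest row among equal minima, matching A's
--     strict-less-than tie-break; s[0] on [] raises IndexError like A).'''
--     s = sorted(weather_data, key=lambda row: row[1])
--     return s[0][0], s[0][1]
-- ===== Notes on version B (the rewrite author's own statement) =====
-- stated objective: simpler
-- what changed: Replaces the index-tracking running-minimum scan with a stable sort by temperature followed by taking the first row (stability reproduces A's first-wins tie-break).
import Mathlib
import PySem

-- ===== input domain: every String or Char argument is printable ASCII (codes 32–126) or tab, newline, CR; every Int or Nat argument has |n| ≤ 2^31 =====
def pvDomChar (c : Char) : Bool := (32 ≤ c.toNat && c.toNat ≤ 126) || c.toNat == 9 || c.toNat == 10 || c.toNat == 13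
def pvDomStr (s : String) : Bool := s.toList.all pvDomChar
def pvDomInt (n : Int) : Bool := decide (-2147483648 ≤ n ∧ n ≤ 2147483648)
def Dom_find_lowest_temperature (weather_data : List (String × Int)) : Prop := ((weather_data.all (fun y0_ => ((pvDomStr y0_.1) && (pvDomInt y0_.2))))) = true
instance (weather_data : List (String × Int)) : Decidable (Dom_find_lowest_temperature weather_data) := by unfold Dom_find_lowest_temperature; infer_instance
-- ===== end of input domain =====

-- B replaces A's index-tracking running-minimum scan by a stable sort ascending
-- by temperature followed by taking the first row (objective: simpler).


-- ===== PORT A =====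
def find_lowest_temperature (weather_data : List (String × Int)) : String × Int :=
  match weather_data with
  | [] => ("", 0)  -- Python raises IndexError on weather_data[0]; excluded by Pre_
  | h :: _ =>
    let st := (PySem.List.pyRange 0 (weather_data.length : Int) 1).foldl
      (fun (st : Int × Int) i =>
        if (PySem.List.pyGetD weather_data i ("", 0)).2 < st.1 then
          ((PySem.List.pyGetD weather_data i ("", 0)).2, i)
        else st) (h.2, 0)
    ((PySem.List.pyGetD weather_data st.2 ("", 0)).1, st.1)

-- ===== PORT B =====
def find_lowest_temperature_alt (weather_data : List (String × Int)) : String × Int :=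
  match PySem.List.sorted weather_data (fun row => row.2) with
  | [] => ("", 0)  -- sorted([])[0] raises IndexError; excluded by Pre_
  | r :: _ => (r.1, r.2)

-- ===== PRECONDITION & SPEC =====
-- Both Pythons raise IndexError on the empty list; nothing else is excluded.
def Pre_find_lowest_temperature (weather_data : List (String × Int)) : Prop := weather_data ≠ []
instance (weather_data : List (String × Int)) : Decidable (Pre_find_lowest_temperature weather_data) := by unfold Pre_find_lowest_temperature; infer_instance
def pvWitness_find_lowest_temperature : (List (String × Int)) := [("2024-01-01", 5), ("2024-01-02", -3)]
def Spec_find_lowest_temperature (weather_data : List (String × Int)) (out : String × Int) : Prop := out = find_lowest_temperature_alt weather_data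
instance (weather_data : List (String × Int)) (out : String × Int) : Decidable (Spec_find_lowest_temperature weather_data out) := by unfold Spec_find_lowest_temperature; infer_instance

-- ===== CLAIM (what is proved, stated in full; the proofs are below) =====
def Claim_equal_find_lowest_temperature : Prop := ∀ (weather_data : List (String × Int)), Dom_find_lowest_temperature weather_data → Pre_find_lowest_temperature weather_data → Spec_find_lowest_temperature weather_data (find_lowest_temperature weather_data)

-- ===== LEMMAS AND PROOFS =====

-- the running-minimum step both sides reduce to (first-wins on ties)
def pvStep (m x : String × Int) : String × Int := if x.2 < m.2 then x else m

-- B side: head of the stable insertion sort is the left fold of pvStep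
theorem head_foldl_insertBy (xs : List (String × Int)) :
    ∀ (m : String × Int) (t : List (String × Int)), ∃ t',
      xs.foldl (fun acc x => PySem.List.insertBy (fun a b => decide (a.2 < b.2)) x acc) (m :: t)
        = (xs.foldl pvStep m) :: t' := by
  induction xs with
  | nil => intro m t; exact ⟨t, rfl⟩
  | cons x xs ih =>
    intro m t
    simp only [List.foldl_cons]
    by_cases h : x.2 < m.2
    · have : PySem.List.insertBy (fun a b => decide (a.2 < b.2)) x (m :: t) = x :: m :: t := by
        simp [PySem.List.insertBy, h]
      rw [this]
      have hs : pvStep m x = x := by simp [pvStep, h]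
      rw [hs]
      exact ih x (m :: t)
    · have : PySem.List.insertBy (fun a b => decide (a.2 < b.2)) x (m :: t)
          = m :: PySem.List.insertBy (fun a b => decide (a.2 < b.2)) x t := by
        simp [PySem.List.insertBy, h]
      rw [this]
      have hs : pvStep m x = m := by simp [pvStep, h]
      rw [hs]
      exact ih m _

theorem alt_eq_foldl (h : String × Int) (t : List (String × Int)) :
    find_lowest_temperature_alt (h :: t) = t.foldl pvStep h := by
  unfold find_lowest_temperature_alt
  rw [PySem.List.sorted_eq_foldl_insertBy]
  simp only [List.foldl_cons]
  have hins : PySem.List.insertBy (fun a b => decide (a.2 < b.2)) h ([] : List (String × Int)) = [h] := by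
    simp [PySem.List.insertBy]
  rw [hins]
  obtain ⟨t', ht'⟩ := head_foldl_insertBy t h []
  rw [ht']

-- A side: loop invariant — the tracked index always points at the running minimum
theorem a_loop (wd : List (String × Int)) :
    ∀ (xs : List (String × Int)) (a : ℕ) (m : String × Int) (idx : Int),
      wd.drop a = xs → PySem.List.pyGetD wd idx ("", 0) = m →
      ∃ idx' : Int,
        (PySem.List.pyRange (a : Int) (wd.length : Int) 1).foldl
          (fun (st : Int × Int) i =>
            if (PySem.List.pyGetD wd i ("", 0)).2 < st.1 then
              ((PySem.List.pyGetD wd i ("", 0)).2, i)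
            else st) (m.2, idx)
        = ((xs.foldl pvStep m).2, idx')
        ∧ PySem.List.pyGetD wd idx' ("", 0) = xs.foldl pvStep m := by
  intro xs
  induction xs generalizing wd with
  | nil =>
    intro a m idx hdrop hidx
    have hlen : wd.length ≤ a := by
      by_contra hc
      have := List.drop_eq_nil_iff.mp hdrop
      omega
    rw [PySem.List.pyRange_one_eq_nil (by exact_mod_cast hlen)]
    exact ⟨idx, rfl, hidx⟩
  | cons x xs ih =>
    intro a m idx hdrop hidx
    have ha : a < wd.length := by
      by_contra hc
      rw [List.drop_eq_nil_iff.mpr (by omega)] at hdrop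
      simp at hdrop
    have hx : wd[a]? = some x := by
      have h0 : (wd.drop a)[0]? = some x := by rw [hdrop]; rfl
      rw [List.getElem?_drop] at h0
      simpa using h0
    have hget : PySem.List.pyGetD wd (a : Int) ("", 0) = x := by
      rw [PySem.List.pyGetD_natCast]
      simp [List.getD, hx]
    rw [PySem.List.pyRange_one_cons (by exact_mod_cast ha)]
    simp only [List.foldl_cons]
    have hdrop' : wd.drop (a + 1) = xs := by
      have h1 : List.drop 1 (List.drop a wd) = List.drop (a + 1) wd := by
        rw [List.drop_drop]
      rw [← h1, hdrop]; rfl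
    by_cases hlt : x.2 < m.2
    · have hstep : pvStep m x = x := by simp [pvStep, hlt]
      rw [hget]
      rw [if_pos hlt]
      have hcast : (a : Int) + 1 = ((a + 1 : ℕ) : Int) := by push_cast; ring
      rw [hcast]
      obtain ⟨idx', h1, h2⟩ := ih wd (a + 1) x (a : Int) hdrop' hget
      rw [hstep]
      exact ⟨idx', h1, h2⟩
    · have hstep : pvStep m x = m := by simp [pvStep, hlt]
      rw [hget, if_neg hlt]
      have hcast : (a : Int) + 1 = ((a + 1 : ℕ) : Int) := by push_cast; ring
      rw [hcast]
      obtain ⟨idx', h1, h2⟩ := ih wd (a + 1) m idx hdrop' hidx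
      rw [hstep]
      exact ⟨idx', h1, h2⟩

theorem a_eq_foldl (h : String × Int) (t : List (String × Int)) :
    find_lowest_temperature (h :: t) = t.foldl pvStep h := by
  unfold find_lowest_temperature
  have hget0 : PySem.List.pyGetD (h :: t) (0 : Int) ("", 0) = h := PySem.List.pyGetD_zero_cons h t ("", 0)
  obtain ⟨idx', h1, h2⟩ := a_loop (h :: t) (h :: t) 0 h 0 rfl hget0
  simp only [Nat.cast_zero] at h1
  simp only [h1, h2]
  have : (h :: t).foldl pvStep h = t.foldl pvStep h := by
    simp [List.foldl_cons, pvStep]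
  rw [this]

-- ===== VERDICT (by name: the statement is the Claim_ definition above) =====
theorem find_lowest_temperature_spec : Claim_equal_find_lowest_temperature := by
  intro wd _ hpre
  match wd with
  | [] => exact absurd rfl hpre
  | h :: t =>
    unfold Spec_find_lowest_temperature
    rw [a_eq_foldl, alt_eq_foldl]
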